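-- pv_equiv track=rewrite | github.com/bokkuembab/BOJAutoPush | 프로그래머스/unrated/138477. 명예의 전당 （1）/명예의 전당 （1）.py | solution
-- ===== SOURCE A (Python) =====
-- def solution(k, score):
--     answer = []
--     prize = []
--
--     for s in score:
--         if len(prize) < k:
--             prize.append(s)
--             answer.append(min(prize))
--             continue
--
--         if min(prize) < s:
--             prize.remove(min(prize))
--             prize.append(s)
--             answer.append(min(prize))
--             continue
--
--         answer.append(min(prize))
--
--     return answer
-- ===== SOURCE B (Python) =====
-- def _insort(top, s):
--     # binary search for the insertion point: first index whose element is >= s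
--     lo, hi = 0, len(top)
--     while lo < hi:
--         mid = (lo + hi) // 2
--         if top[mid] < s:
--             lo = mid + 1
--         else:
--             hi = mid
--     top.insert(lo, s)
--
--
-- def solution(k, score):
--     answer = []
--     top = []  # ascending-sorted list of the top-k scores so far
--     for s in score:
--         if len(top) < k:
--             _insort(top, s)
--         elif top[0] < s:
--             top.pop(0)
--             _insort(top, s)
--         answer.append(top[0])
--     return answer
-- ===== Notes on version B (the rewrite author's own statement) =====
-- stated objective: faster
-- what changed: B keeps the top-k multiset as an ascending-sorted list: each day's answer is its first element and each update is one binary-search insertion, replacing A's three-to-four full min()/remove() scans of the prize list per day.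
import Mathlib
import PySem

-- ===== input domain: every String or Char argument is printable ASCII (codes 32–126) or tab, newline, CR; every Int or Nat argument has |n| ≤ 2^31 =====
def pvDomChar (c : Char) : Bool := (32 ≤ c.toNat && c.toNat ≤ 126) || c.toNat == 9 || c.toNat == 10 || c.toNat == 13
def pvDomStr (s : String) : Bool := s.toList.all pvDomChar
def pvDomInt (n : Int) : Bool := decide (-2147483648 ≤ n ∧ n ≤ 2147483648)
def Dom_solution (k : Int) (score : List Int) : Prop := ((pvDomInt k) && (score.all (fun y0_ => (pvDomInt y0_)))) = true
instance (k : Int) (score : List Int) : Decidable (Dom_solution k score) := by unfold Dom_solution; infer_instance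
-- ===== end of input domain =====

-- B keeps the top-k multiset as an ascending-sorted list: each day's answer is its first
-- element and each update is one binary-search insertion, instead of A's repeated
-- min()/remove() scans of the prize list.

-- ===== PORT A =====
-- min(prize): PySem.List.min? with identity key; getD 0 is reached only when prize = [],
-- where Python raises ValueError — those inputs are excluded by Pre_solution.
def pyMin (l : List Int) : Int := (PySem.List.min? l (fun x => x)).getD 0

-- prize.remove(v): PySem.List.remove?; getD's default is reached only when v ∉ prize,
-- impossible here since v = min(prize) ∈ prize.
def pyRemove (l : List Int) (v : Int) : List Int := (PySem.List.remove? l v).getD l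

def solution (k : Int) (score : List Int) : List Int :=
  (score.foldl (fun (st : List Int × List Int) s =>
      let answer := st.1
      let prize := st.2
      if (prize.length : Int) < k then
        let prize := prize ++ [s]
        (answer ++ [pyMin prize], prize)
      else if pyMin prize < s then
        let prize := pyRemove prize (pyMin prize) ++ [s]
        (answer ++ [pyMin prize], prize)
      else
        (answer ++ [pyMin prize], prize)) ([], [])).1

-- ===== PORT B =====
-- the 'while lo < hi' loop of _insort; lo, hi are always ≥ 0 so they are Nat here;
-- the structural counter 'fuel' only bounds the iteration count (the gap hi - lo shrinks
-- every pass, so fuel = hi - lo is enough and the loop's behaviour is unchanged);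
-- top[mid]: on every call mid < hi ≤ len(top), so getD's default is never used.
def bsearchFuel (top : List Int) (s : Int) : Nat → Nat → Nat → Nat
  | 0, lo, _ => lo
  | fuel + 1, lo, hi =>
    if lo < hi then
      if top.getD ((lo + hi) / 2) 0 < s then bsearchFuel top s fuel ((lo + hi) / 2 + 1) hi
      else bsearchFuel top s fuel lo ((lo + hi) / 2)
    else lo

def bsearch (top : List Int) (s : Int) (lo hi : Nat) : Nat :=
  bsearchFuel top s (hi - lo) lo hi

-- top.insert(lo, s) with 0 ≤ lo ≤ len(top) is exactly take/cons/drop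
def insortB (top : List Int) (s : Int) : List Int :=
  top.take (bsearch top s 0 top.length) ++ s :: top.drop (bsearch top s 0 top.length)

-- top[0]: headD 0 reached only when top = [], where Python raises IndexError — excluded by Pre_solution.
def solution_alt (k : Int) (score : List Int) : List Int :=
  (score.foldl (fun (st : List Int × List Int) s =>
      let answer := st.1
      let top := st.2
      let top :=
        if (top.length : Int) < k then insortB top s
        else if top.headD 0 < s then insortB (top.drop 1) s
        else top
      (answer ++ [top.headD 0], top)) ([], [])).1

-- ===== PRECONDITION & SPEC =====
-- Pre_ excludes exactly the inputs where Python A raises: k ≤ 0 with a nonempty score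
-- makes min(prize) hit an empty list (ValueError).
def Pre_solution (k : Int) (score : List Int) : Prop := score = [] ∨ 1 ≤ k
instance (k : Int) (score : List Int) : Decidable (Pre_solution k score) := by unfold Pre_solution; infer_instance
def pvWitness_solution : Int × List Int := (3, [10, 100, 20, 150, 1, 100, 200])
def Spec_solution (k : Int) (score : List Int) (out : List Int) : Prop := out = solution_alt k score
instance (k : Int) (score : List Int) (out : List Int) : Decidable (Spec_solution k score out) := by unfold Spec_solution; infer_instance

-- ===== CLAIM (what is proved, stated in full; the proofs are below) =====
def Claim_equal_solution : Prop := ∀ (k : Int) (score : List Int), Dom_solution k score → Pre_solution k score → Spec_solution k score (solution k score)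

-- ===== LEMMAS AND PROOFS =====

-- proof-only model of one insortB step: insertion before the first element ≥ s
def insSorted (s : Int) (xs : List Int) : List Int :=
  xs.takeWhile (fun x => decide (x < s)) ++ s :: xs.dropWhile (fun x => decide (x < s))

theorem insSorted_perm (s : Int) (xs : List Int) : (insSorted s xs).Perm (s :: xs) := by
  unfold insSorted
  calc (xs.takeWhile (fun x => decide (x < s)) ++ s :: xs.dropWhile (fun x => decide (x < s))).Perm
        (s :: (xs.takeWhile (fun x => decide (x < s)) ++ xs.dropWhile (fun x => decide (x < s)))) :=
        List.perm_middle
    _ = s :: xs := by rw [List.takeWhile_append_dropWhile]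

theorem insSorted_sorted (s : Int) (xs : List Int) (h : xs.Pairwise (· ≤ ·)) :
    (insSorted s xs).Pairwise (· ≤ ·) := by
  induction xs with
  | nil => simp [insSorted]
  | cons x t ih =>
    rcases List.pairwise_cons.mp h with ⟨hx, ht⟩
    by_cases hlt : x < s
    · have : insSorted s (x :: t) = x :: insSorted s t := by
        simp [insSorted, hlt]
      rw [this]
      refine List.pairwise_cons.mpr ⟨?_, ih ht⟩
      intro y hy
      rcases List.mem_cons.mp ((insSorted_perm s t).mem_iff.mp hy) with rfl | h2
      · exact le_of_lt hlt
      · exact hx y h2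
    · have : insSorted s (x :: t) = s :: x :: t := by
        simp [insSorted, hlt]
      rw [this]
      refine List.pairwise_cons.mpr ⟨?_, h⟩
      intro y hy
      rcases List.mem_cons.mp hy with rfl | h2
      · exact not_lt.mp hlt
      · exact le_trans (not_lt.mp hlt) (hx y h2)

theorem insSorted_ne_nil (s : Int) (xs : List Int) : insSorted s xs ≠ [] := by
  intro h
  have := (insSorted_perm s xs).length_eq
  simp [h] at this

-- in a sorted list, the element at index i is < s exactly when i lies in the takeWhile prefix
theorem getD_lt_iff (xs : List Int) (s : Int) (hs : xs.Pairwise (· ≤ ·)) :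
    ∀ i, i < xs.length →
      (xs.getD i 0 < s ↔ i < (xs.takeWhile (fun x => decide (x < s))).length) := by
  induction xs with
  | nil => intro i h; simp at h
  | cons x t ih =>
    intro i hi
    rcases List.pairwise_cons.mp hs with ⟨hx, ht⟩
    cases i with
    | zero =>
      by_cases hxs : x < s
      · simp [hxs]
      · simp [hxs]
    | succ j =>
      have hj : j < t.length := by simpa using hi
      by_cases hxs : x < s
      · have h1 := ih ht j hj
        simp [hxs]
        constructor
        · intro h; exact h1.mp h
        · intro h; exact h1.mpr h
      · have h1 : s ≤ x := not_lt.mp hxs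
        have hle : x ≤ t[j] := hx _ (List.getElem_mem hj)
        rw [List.getD_cons_succ, List.getD_eq_getElem t 0 hj]
        simp [hxs]
        omega

theorem bsearchFuel_eq (xs : List Int) (s : Int) (hs : xs.Pairwise (· ≤ ·)) :
    ∀ (d lo hi : Nat), hi - lo ≤ d →
      lo ≤ (xs.takeWhile (fun x => decide (x < s))).length →
      (xs.takeWhile (fun x => decide (x < s))).length ≤ hi →
      hi ≤ xs.length →
      bsearchFuel xs s d lo hi = (xs.takeWhile (fun x => decide (x < s))).length := by
  intro d
  induction d with
  | zero =>
    intro lo hi h1 h2 h3 h4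
    simp only [bsearchFuel]
    omega
  | succ d ih =>
    intro lo hi h1 h2 h3 h4
    by_cases hlh : lo < hi
    · have hmid : (lo + hi) / 2 < hi := by omega
      have hmidge : lo ≤ (lo + hi) / 2 := by omega
      by_cases hx : xs.getD ((lo + hi) / 2) 0 < s
      · have hltc : (lo + hi) / 2 < (xs.takeWhile (fun x => decide (x < s))).length :=
          (getD_lt_iff xs s hs _ (by omega)).mp hx
        simp only [bsearchFuel, hlh, if_pos, hx]
        exact ih ((lo + hi) / 2 + 1) hi (by omega) (by omega) h3 h4
      · have hgec : (xs.takeWhile (fun x => decide (x < s))).length ≤ (lo + hi) / 2 := by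
          by_contra hlt
          exact hx ((getD_lt_iff xs s hs _ (by omega)).mpr (by omega))
        simp only [bsearchFuel, hlh, if_pos, hx, if_neg, not_false_iff]
        exact ih lo ((lo + hi) / 2) (by omega) h2 hgec (by omega)
    · simp only [bsearchFuel, hlh, if_neg, not_false_iff]
      omega

theorem bsearch_eq (xs : List Int) (s : Int) (hs : xs.Pairwise (· ≤ ·)) (lo hi : Nat)
    (h2 : lo ≤ (xs.takeWhile (fun x => decide (x < s))).length)
    (h3 : (xs.takeWhile (fun x => decide (x < s))).length ≤ hi)
    (h4 : hi ≤ xs.length) :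
    bsearch xs s lo hi = (xs.takeWhile (fun x => decide (x < s))).length := by
  unfold bsearch
  exact bsearchFuel_eq xs s hs (hi - lo) lo hi le_rfl h2 h3 h4

theorem insortB_eq (xs : List Int) (s : Int) (hs : xs.Pairwise (· ≤ ·)) :
    insortB xs s = insSorted s xs := by
  unfold insortB insSorted
  have hc : (xs.takeWhile (fun x => decide (x < s))).length ≤ xs.length :=
    (List.takeWhile_prefix _).length_le
  rw [bsearch_eq xs s hs 0 xs.length (by omega) hc le_rfl]
  have htake : xs.take (xs.takeWhile (fun x => decide (x < s))).length
      = xs.takeWhile (fun x => decide (x < s)) :=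
    (List.prefix_iff_eq_take.mp (List.takeWhile_prefix _)).symm
  have hdropw : xs.drop (xs.takeWhile (fun x => decide (x < s))).length
      = xs.dropWhile (fun x => decide (x < s)) := by
    have h := List.takeWhile_append_dropWhile (p := fun x => decide (x < s)) (l := xs)
    calc xs.drop (xs.takeWhile (fun x => decide (x < s))).length
        = (xs.takeWhile (fun x => decide (x < s)) ++ xs.dropWhile (fun x => decide (x < s))).drop
            (xs.takeWhile (fun x => decide (x < s))).length := by rw [h]
      _ = xs.dropWhile (fun x => decide (x < s)) := List.drop_left
  rw [htake, hdropw]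

-- min() of any permutation of a sorted nonempty list is its head
theorem pyMin_of_perm_sorted (l : List Int) (m : Int) (t : List Int)
    (hp : l.Perm (m :: t)) (hs : (m :: t).Pairwise (· ≤ ·)) :
    pyMin l = m := by
  unfold pyMin
  have hne : l ≠ [] := by
    intro h; subst h; exact (List.cons_ne_nil m t) hp.nil_eq.symm
  obtain ⟨m', hm'⟩ : ∃ m', PySem.List.min? l (fun x => x) = some m' := by
    cases h : PySem.List.min? l (fun x => x) with
    | none => exact absurd ((PySem.List.min?_eq_none_iff l (fun x => x)).mp h) hne
    | some v => exact ⟨v, rfl⟩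
  rw [hm']
  have hmem : m' ∈ l := PySem.List.min?_mem hm'
  have hmin : ∀ y ∈ l, m' ≤ y := fun y hy => PySem.List.min?_isMin hm' y hy
  have hm_mem : m ∈ l := hp.mem_iff.mpr (List.mem_cons_self)
  have h1 : m' ≤ m := hmin m hm_mem
  have h2 : m ≤ m' := by
    have := hp.mem_iff.mp hmem
    rcases List.mem_cons.mp this with rfl | h
    · exact le_refl _
    · exact (List.pairwise_cons.mp hs).1 m' h
  simp [le_antisymm h1 h2]

-- the loop invariant: same answers, prize a permutation of the sorted top list
theorem loop_eq (k : Int) (hk : 1 ≤ k) :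
    ∀ (score : List Int) (ans prize top : List Int),
      prize.Perm top → top.Pairwise (· ≤ ·) →
      (score.foldl (fun (st : List Int × List Int) s =>
        let answer := st.1
        let prize := st.2
        if (prize.length : Int) < k then
          let prize := prize ++ [s]
          (answer ++ [pyMin prize], prize)
        else if pyMin prize < s then
          let prize := pyRemove prize (pyMin prize) ++ [s]
          (answer ++ [pyMin prize], prize)
        else
          (answer ++ [pyMin prize], prize)) (ans, prize)).1 =
      (score.foldl (fun (st : List Int × List Int) s =>
        let answer := st.1
        let top := st.2
        let top :=
          if (top.length : Int) < k then insortB top s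
          else if top.headD 0 < s then insortB (top.drop 1) s
          else top
        (answer ++ [top.headD 0], top)) (ans, top)).1 := by
  intro score
  induction score with
  | nil => intro ans prize top _ _; simp
  | cons s rest ih =>
    intro ans prize top hperm hsort
    simp only [List.foldl_cons]
    have hlen : prize.length = top.length := hperm.length_eq
    by_cases hcap : (prize.length : Int) < k
    · -- append branch
      have hcap' : (top.length : Int) < k := hlen ▸ hcap
      have hins : insortB top s = insSorted s top := insortB_eq top s hsort
      simp only [hcap, hcap', if_pos, hins]
      obtain ⟨m, t, hmt⟩ : ∃ m t, insSorted s top = m :: t := by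
        cases h : insSorted s top with
        | nil => exact absurd h (insSorted_ne_nil s top)
        | cons a b => exact ⟨a, b, rfl⟩
      have hsort' : (insSorted s top).Pairwise (· ≤ ·) := insSorted_sorted s top hsort
      have hperm' : (prize ++ [s]).Perm (insSorted s top) := by
        refine List.Perm.trans ?_ (insSorted_perm s top).symm
        calc (prize ++ [s]).Perm (s :: prize) := List.perm_append_singleton s prize
          _ |>.Perm (s :: top) := hperm.cons s
      have hmin : pyMin (prize ++ [s]) = m :=
        pyMin_of_perm_sorted _ m t (hmt ▸ hperm') (hmt ▸ hsort')
      rw [ih (ans ++ [pyMin (prize ++ [s])]) (prize ++ [s]) (insSorted s top) hperm' hsort']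
      rw [hmin, hmt]
      simp
    · -- full: top has ≥ k ≥ 1 elements, so top = m :: t
      have hcap' : ¬ (top.length : Int) < k := hlen ▸ hcap
      obtain ⟨m, t, hmt⟩ : ∃ m t, top = m :: t := by
        cases top with
        | nil => exfalso; simp at hcap'; omega
        | cons a b => exact ⟨a, b, rfl⟩
      subst hmt
      have hminp : pyMin prize = m := pyMin_of_perm_sorted _ m t hperm hsort
      have hsort_t : t.Pairwise (· ≤ ·) := (List.pairwise_cons.mp hsort).2
      have hins : insortB t s = insSorted s t := insortB_eq t s hsort_t
      by_cases hlt : m < s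
      · -- replace branch
        simp only [hcap, hcap', if_neg, hminp, List.headD_cons, hlt, if_pos, not_false_iff,
          List.drop_one, List.tail_cons, hins]
        have hm_mem : m ∈ prize := hperm.mem_iff.mpr (List.mem_cons_self)
        have hrem : pyRemove prize m = prize.erase m := by
          unfold pyRemove
          rw [PySem.List.remove?_eq_some_erase prize m hm_mem]; rfl
        have htail : (prize.erase m).Perm t := by
          have := hperm.erase m
          simpa using this
        have hperm' : (pyRemove prize m ++ [s]).Perm (insSorted s t) := by
          rw [hrem]
          refine List.Perm.trans ?_ (insSorted_perm s t).symm
          calc (prize.erase m ++ [s]).Perm (s :: prize.erase m) := List.perm_append_singleton s _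
            _ |>.Perm (s :: t) := htail.cons s
        have hsort' : (insSorted s t).Pairwise (· ≤ ·) := insSorted_sorted s t hsort_t
        obtain ⟨m', t', hmt'⟩ : ∃ m' t', insSorted s t = m' :: t' := by
          cases h : insSorted s t with
          | nil => exact absurd h (insSorted_ne_nil s t)
          | cons a b => exact ⟨a, b, rfl⟩
        have hmin' : pyMin (pyRemove prize m ++ [s]) = m' :=
          pyMin_of_perm_sorted _ m' t' (hmt' ▸ hperm') (hmt' ▸ hsort')
        rw [ih _ _ _ hperm' hsort']
        simp [hmin', hmt']
      · -- unchanged branch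
        simp only [hcap, hcap', if_neg, hminp, List.headD_cons, hlt, if_neg, not_false_iff]
        rw [ih _ _ _ hperm hsort]

-- ===== VERDICT (by name: the statement is the Claim_ definition above) =====
theorem solution_spec : Claim_equal_solution := by
  intro k score _ hpre
  unfold Spec_solution solution solution_alt
  rcases hpre with rfl | hk
  · simp
  · exact loop_eq k hk score [] [] [] (List.Perm.refl []) (by simp)
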